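-- pv_equiv track=rewrite | github.com/acp19tag/conll_noise_induction | scripts/utils.py | generate_answers_dict
-- ===== SOURCE A (Python) =====
-- def find_number_of_annotators(y):
--     return len(y[0][0])
--
-- def concatenate_answers(annotator_id, y_answers, y_ground_truth):
--     """ returns two lists with no missing values; y_true, y_pred """
--     y_true = []
--     y_pred = []
--     for index, work_item in enumerate(y_answers):
--         worker_label_list = [x[annotator_id] for x in work_item]
--         if not worker_label_list.count('?'):
--             y_pred.extend(worker_label_list)
--             y_true.extend(y_ground_truth[index])
--     return y_true, y_pred
--
-- def generate_answers_dict(y_answers, y_ground_truth):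
--     answers_dict = {}
--     for annotator_id in range(find_number_of_annotators(y_answers)):
--         y_true, y_pred = concatenate_answers(annotator_id, y_answers, y_ground_truth)
--         answers_dict[annotator_id] = {
--             "y_true": y_true,
--             "y_pred": y_pred
--         }
--     return answers_dict
-- ===== SOURCE B (Python) =====
-- def generate_answers_dict(y_answers, y_ground_truth):
--     # Two staged passes: (1) one token-level scan per work item builds the set of
--     # annotators that used '?' there, giving per-annotator lists of usable item
--     # INDICES; (2) the labels are gathered afterwards by indexing.
--     n = len(y_answers[0][0])
--     valid_items = [[] for _ in range(n)]
--     for i, item in enumerate(y_answers):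
--         bad = {a for x in item for a, lab in enumerate(x) if lab == '?'}
--         for a in range(n):
--             if a not in bad:
--                 valid_items[a].append(i)
--     return {a: {"y_true": [t for i in valid_items[a] for t in y_ground_truth[i]],
--                 "y_pred": [x[a] for i in valid_items[a] for x in y_answers[i]]}
--             for a in range(n)}
-- ===== Notes on version B (the rewrite author's own statement) =====
-- stated objective: alternative
-- what changed: Instead of A's per-annotator re-scan of all work items collecting labels directly, B runs two stages: one token-level pass per work item builds a set of annotators that answered '?' there, producing per-annotator lists of usable item indices, and a second stage gathers the labels by indexing into y_answers/y_ground_truth.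
import Mathlib
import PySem

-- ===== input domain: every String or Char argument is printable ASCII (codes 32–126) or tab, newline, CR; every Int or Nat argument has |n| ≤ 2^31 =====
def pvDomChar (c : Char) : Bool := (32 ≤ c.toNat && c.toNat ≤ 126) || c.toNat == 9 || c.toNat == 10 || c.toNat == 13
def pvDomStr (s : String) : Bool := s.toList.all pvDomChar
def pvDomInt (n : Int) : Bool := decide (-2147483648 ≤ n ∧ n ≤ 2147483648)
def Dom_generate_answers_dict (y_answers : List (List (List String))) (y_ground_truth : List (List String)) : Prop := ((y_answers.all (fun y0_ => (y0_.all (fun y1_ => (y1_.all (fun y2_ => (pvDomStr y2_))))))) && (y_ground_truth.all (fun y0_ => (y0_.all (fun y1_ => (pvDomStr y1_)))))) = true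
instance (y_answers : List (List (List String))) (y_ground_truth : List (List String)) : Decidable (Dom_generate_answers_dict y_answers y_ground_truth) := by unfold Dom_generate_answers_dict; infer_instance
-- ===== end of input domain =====

-- B replaces A's per-annotator label-collecting re-scan by two stages: a token-level pass per work
-- item building the set of annotators that answered '?', giving per-annotator lists of usable item
-- indices, then a gather of the labels by index (objective: alternative).


-- ===== PORT A =====
-- len(y[0][0]); totalized with headD — exact under Pre_ (y_answers and its first item nonempty)
def pv_find_number_of_annotators (y : List (List (List String))) : Nat :=
  ((y.headD []).headD []).length

-- returns (y_true, y_pred); x[annotator_id] / y_ground_truth[index] via pyGetD, exact under Pre_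
def pv_concatenate_answers (annotator_id : Int) (y_answers : List (List (List String)))
    (y_ground_truth : List (List String)) : List String × List String :=
  (PySem.List.enumerate y_answers).foldl
    (fun (acc : List String × List String) iw =>
      let worker_label_list := iw.2.map (fun x => PySem.List.pyGetD x annotator_id "")
      if worker_label_list.count "?" = 0 then
        (acc.1 ++ PySem.List.pyGetD y_ground_truth iw.1 [], acc.2 ++ worker_label_list)
      else acc)
    ([], [])

def generate_answers_dict (y_answers : List (List (List String))) (y_ground_truth : List (List String)) : List (Int × List (String × List String)) :=
  ((PySem.List.pyRange 0 (pv_find_number_of_annotators y_answers) 1).foldl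
    (fun (d : PySem.Dict Int (List (String × List String))) annotator_id =>
      d.insert annotator_id
        [("y_true", (pv_concatenate_answers annotator_id y_answers y_ground_truth).1),
         ("y_pred", (pv_concatenate_answers annotator_id y_answers y_ground_truth).2)])
    PySem.Dict.empty).items

-- ===== PORT B =====
-- bad = {a for x in item for a, lab in enumerate(x) if lab == '?'}
def pvBadSet (item : List (List String)) : PySem.Set Int :=
  item.foldl (fun s x =>
    (PySem.List.enumerate x).foldl
      (fun s p => if p.2 == "?" then PySem.Set.add s p.1 else s) s)
    PySem.Set.empty

def generate_answers_dict_alt (y_answers : List (List (List String))) (y_ground_truth : List (List String)) : List (Int × List (String × List String)) :=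
  let n := ((y_answers.headD []).headD []).length
  -- stage 1: per-annotator lists of usable work-item indices
  let valid_items := (PySem.List.enumerate y_answers).foldl
    (fun vs iw => vs.mapIdx (fun a l =>
      if (pvBadSet iw.2).contains (a : Int) then l else l ++ [iw.1]))
    (List.replicate n ([] : List Int))
  -- stage 2: gather labels by index (dict comprehension over fresh keys range(n))
  (PySem.List.pyRange 0 n 1).map (fun a =>
    (a, [("y_true",
          (PySem.List.pyGetD valid_items a []).flatMap
            (fun i => PySem.List.pyGetD y_ground_truth i [])),
         ("y_pred",
          (PySem.List.pyGetD valid_items a []).flatMap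
            (fun i => (PySem.List.pyGetD y_answers i []).map
              (fun x => PySem.List.pyGetD x a "")))]))

-- ===== PRECONDITION & SPEC =====
-- Pre_ = exactly where Python A returns: y_answers and its first work item nonempty (len(y[0][0])),
-- every token long enough for every annotator column, and y_ground_truth[index] in range whenever
-- some annotator column of work item `index` is '?'-free (only then is it accessed).
def Pre_generate_answers_dict (y_answers : List (List (List String))) (y_ground_truth : List (List String)) : Prop :=
  y_answers ≠ [] ∧ y_answers.headD [] ≠ [] ∧
  (∀ item ∈ y_answers, ∀ x ∈ item, ((y_answers.headD []).headD []).length ≤ x.length) ∧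
  (∀ p ∈ y_answers.zipIdx,
    (∃ a ∈ List.range ((y_answers.headD []).headD []).length, ∀ x ∈ p.1, x.getD a "" ≠ "?") →
    p.2 < y_ground_truth.length)
instance (y_answers : List (List (List String))) (y_ground_truth : List (List String)) : Decidable (Pre_generate_answers_dict y_answers y_ground_truth) := by unfold Pre_generate_answers_dict; infer_instance

def pvWitness_generate_answers_dict : List (List (List String)) × List (List String) :=
  ([[["A"], ["B"]], [["?"], ["C"]]], [["t1", "t2"], ["t3", "t4"]])

def Spec_generate_answers_dict (y_answers : List (List (List String))) (y_ground_truth : List (List String)) (out : List (Int × List (String × List String))) : Prop := out = generate_answers_dict_alt y_answers y_ground_truth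
instance (y_answers : List (List (List String))) (y_ground_truth : List (List String)) (out : List (Int × List (String × List String))) : Decidable (Spec_generate_answers_dict y_answers y_ground_truth out) := by unfold Spec_generate_answers_dict; infer_instance

-- ===== CLAIM (what is proved, stated in full; the proofs are below) =====
def Claim_equal_generate_answers_dict : Prop := ∀ (y_answers : List (List (List String))) (y_ground_truth : List (List String)), Dom_generate_answers_dict y_answers y_ground_truth → Pre_generate_answers_dict y_answers y_ground_truth → Spec_generate_answers_dict y_answers y_ground_truth (generate_answers_dict y_answers y_ground_truth)

-- ===== LEMMAS AND PROOFS =====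

-- A's paired accumulator fold, as two filtered flatMaps
theorem pv_foldl_pair {α β γ : Type} (p : α → Prop) [DecidablePred p]
    (g1 : α → List β) (g2 : α → List γ) (l : List α) :
    ∀ (t : List β) (pa : List γ),
      l.foldl (fun acc x => if p x then (acc.1 ++ g1 x, acc.2 ++ g2 x) else acc) (t, pa)
        = (t ++ (l.filter (fun x => decide (p x))).flatMap g1,
           pa ++ (l.filter (fun x => decide (p x))).flatMap g2) := by
  induction l with
  | nil => intro t pa; simp
  | cons x l ih =>
    intro t pa
    by_cases h : p x
    · simp [List.foldl_cons, h, ih]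
    · simp [List.foldl_cons, h, ih]

-- membership in pvBadSet
-- the inner fold of pvBadSet is a Set.update
theorem pv_badSet_inner (l : List (Int × String)) :
    ∀ (s : PySem.Set Int),
      l.foldl (fun s p => if p.2 == "?" then PySem.Set.add s p.1 else s) s
        = PySem.Set.update s ((l.filter (fun p => p.2 == "?")).map (·.1)) := by
  induction l with
  | nil => intro s; simp [PySem.Set.update]
  | cons p l ih =>
    intro s
    simp only [List.foldl_cons, List.filter_cons]
    by_cases h : (p.2 == "?") = true
    · rw [if_pos h, if_pos h, ih, List.map_cons]
      simp [PySem.Set.update]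
    · rw [if_neg h, if_neg h, ih]

theorem pv_mem_foldl_update {α β : Type} [BEq β] [LawfulBEq β] (f : α → List β) (l : List α) :
    ∀ (s : PySem.Set β) (b : β),
      b ∈ l.foldl (fun s x => PySem.Set.update s (f x)) s ↔ b ∈ s ∨ ∃ x ∈ l, b ∈ f x := by
  induction l with
  | nil => intro s b; simp
  | cons x l ih =>
    intro s b
    rw [List.foldl_cons, ih, PySem.Set.mem_update]
    simp [or_assoc]

theorem pv_mem_badSet (item : List (List String)) (b : Int) :
    b ∈ pvBadSet item ↔ ∃ x ∈ item, ∃ p ∈ PySem.List.enumerate x, p.2 = "?" ∧ p.1 = b := by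
  unfold pvBadSet
  have h : (fun (s : PySem.Set Int) (x : List String) =>
      (PySem.List.enumerate x).foldl (fun s p => if p.2 == "?" then PySem.Set.add s p.1 else s) s)
      = fun s x => PySem.Set.update s (((PySem.List.enumerate x).filter (fun p => p.2 == "?")).map (·.1)) := by
    funext s x; exact pv_badSet_inner (PySem.List.enumerate x) s
  rw [h, pv_mem_foldl_update]
  constructor
  · rintro (hemp | ⟨x, hx, hb⟩)
    · simp [PySem.Set.empty] at hemp
    · rcases List.mem_map.mp hb with ⟨p, hp, rfl⟩
      rcases List.mem_filter.mp hp with ⟨hpmem, hpq⟩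
      exact ⟨x, hx, p, hpmem, by simpa using hpq, rfl⟩
  · rintro ⟨x, hx, p, hp, hq, rfl⟩
    exact Or.inr ⟨x, hx, List.mem_map.mpr ⟨p, List.mem_filter.mpr ⟨hp, by simp [hq]⟩, rfl⟩⟩

-- the valid_items fold, read at one annotator index
theorem pv_valid_get (l : List (Int × List (List String))) :
    ∀ (accs : List (List Int)) (a : Nat), a < accs.length →
      (l.foldl (fun vs iw => vs.mapIdx (fun a' l' =>
          if (pvBadSet iw.2).contains (a' : Int) then l' else l' ++ [iw.1])) accs)[a]?
        = some (l.foldl (fun l' iw =>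
            if (pvBadSet iw.2).contains (a : Int) then l' else l' ++ [iw.1]) (accs.getD a [])) := by
  induction l with
  | nil =>
    intro accs a h
    simp only [List.foldl_nil]
    simp [List.getD, List.getElem?_eq_getElem h]
  | cons iw l ih =>
    intro accs a h
    rw [List.foldl_cons,
        ih (accs.mapIdx (fun a' l' => if (pvBadSet iw.2).contains (a' : Int) then l' else l' ++ [iw.1])) a (by simpa using h),
        List.foldl_cons]
    congr 2
    simp [List.getD, List.getElem?_mapIdx, List.getElem?_eq_getElem h]

-- indexing back into the enumerated list returns the element itself
theorem pv_getD_enum {α : Type} (xs : List α) (d : α) :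
    ∀ p ∈ PySem.List.enumerate xs 0, PySem.List.pyGetD xs p.1 d = p.2 := by
  intro p hp
  rcases (PySem.List.mem_enumerate_iff _ _ _).mp hp with ⟨k, hk, rfl⟩
  simp [PySem.List.pyGetD_natCast, List.getD, List.getElem?_eq_getElem hk]

-- A's per-annotator condition agrees with B's bad-set test
theorem pv_cond_eq (item : List (List String)) (k : Nat) :
    decide ((item.map (fun x => PySem.List.pyGetD x (k : Int) "")).count "?" = 0)
      = !(pvBadSet item).contains (k : Int) := by
  rw [Bool.eq_iff_iff]
  simp only [decide_eq_true_eq, Bool.not_eq_true', Bool.eq_false_iff, ne_eq,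
    PySem.Set.contains_iff, pv_mem_badSet]
  rw [List.count_eq_zero]
  constructor
  · rintro h ⟨x, hx, p, hp, hq, hk⟩
    rcases (PySem.List.mem_enumerate_iff _ _ _).mp hp with ⟨j, hj, rfl⟩
    simp only [zero_add] at hk hq
    have hjk : j = k := by exact_mod_cast hk
    subst hjk
    exact h (by
      refine List.mem_map.mpr ⟨x, hx, ?_⟩
      simp [PySem.List.pyGetD_natCast, List.getD, List.getElem?_eq_getElem hj, hq])
  · intro h hmem
    rcases List.mem_map.mp hmem with ⟨x, hx, hq⟩
    by_cases hk : k < x.length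
    · exact h ⟨x, hx, (0 + (k : Int), x[k]), (PySem.List.mem_enumerate_iff _ _ _).mpr ⟨k, hk, rfl⟩,
        by simpa [PySem.List.pyGetD_natCast, List.getD, List.getElem?_eq_getElem hk] using hq, by simp⟩
    · rw [PySem.List.pyGetD_natCast, List.getD, List.getElem?_eq_none (by omega)] at hq
      simp at hq

theorem pv_main (ys : List (List (List String))) (gt : List (List String)) :
    generate_answers_dict ys gt = generate_answers_dict_alt ys gt := by
  unfold generate_answers_dict generate_answers_dict_alt pv_find_number_of_annotators
  set n := ((ys.headD []).headD []).length with hn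
  rw [PySem.Dict.items_foldl_insert_fresh _ (fun a => a)
        (fun a => [("y_true", (pv_concatenate_answers a ys gt).1),
                   ("y_pred", (pv_concatenate_answers a ys gt).2)])
        PySem.Dict.empty
        (fun a _ => PySem.Dict.contains_empty a)
        (by simpa using PySem.List.nodup_pyRange_one 0 n)]
  have hemp : (PySem.Dict.empty : PySem.Dict Int (List (String × List String))).items = [] := rfl
  rw [hemp, List.nil_append]
  apply List.map_congr_left
  intro a ha
  rcases PySem.List.mem_pyRange_one.mp ha with ⟨ha0, han⟩
  obtain ⟨k, rfl⟩ : ∃ k : Nat, a = (k : Int) := ⟨a.toNat, (Int.toNat_of_nonneg ha0).symm⟩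
  have hkn : k < n := by exact_mod_cast han
  -- stage-1 accumulator read at annotator k
  have hget := pv_valid_get (PySem.List.enumerate ys) (List.replicate n ([] : List Int)) k
      (by simpa using hkn)
  have hgetD : (List.replicate n ([] : List Int)).getD k [] = [] := by
    simp [List.getD, List.getElem?_eq_getElem
      (by simpa using hkn : k < (List.replicate n ([] : List Int)).length)]
  rw [hgetD] at hget
  have hvalid : PySem.List.pyGetD
      ((PySem.List.enumerate ys).foldl (fun vs iw => vs.mapIdx (fun a' l' =>
        if (pvBadSet iw.2).contains (a' : Int) then l' else l' ++ [iw.1]))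
        (List.replicate n ([] : List Int))) (k : Int) []
      = (PySem.List.enumerate ys).foldl (fun l' iw =>
          if (pvBadSet iw.2).contains (k : Int) then l' else l' ++ [iw.1]) [] := by
    rw [PySem.List.pyGetD_natCast, List.getD, hget, Option.getD_some]
  rw [hvalid]
  -- stage-1 per-annotator fold is a filtered index map
  have hstep : (fun (l' : List Int) (iw : Int × List (List String)) =>
      if (pvBadSet iw.2).contains (k : Int) then l' else l' ++ [iw.1])
      = (fun l' iw => if (!(pvBadSet iw.2).contains (k : Int)) = true then l' ++ [iw.1] else l') := by
    funext l' iw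
    cases hb : (pvBadSet iw.2).contains (k : Int) <;> simp
  rw [hstep, PySem.List.foldl_append_if, List.nil_append]
  -- A's fold as two filtered flatMaps
  have hconc : pv_concatenate_answers (k : Int) ys gt
      = (((PySem.List.enumerate ys).filter (fun iw =>
            decide ((iw.2.map (fun x => PySem.List.pyGetD x (k : Int) "")).count "?" = 0))).flatMap
            (fun iw => PySem.List.pyGetD gt iw.1 []),
         ((PySem.List.enumerate ys).filter (fun iw =>
            decide ((iw.2.map (fun x => PySem.List.pyGetD x (k : Int) "")).count "?" = 0))).flatMap
            (fun iw => iw.2.map (fun x => PySem.List.pyGetD x (k : Int) ""))) := by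
    unfold pv_concatenate_answers
    exact pv_foldl_pair
      (fun iw : Int × List (List String) =>
        (iw.2.map (fun x => PySem.List.pyGetD x (k : Int) "")).count "?" = 0)
      (fun iw => PySem.List.pyGetD gt iw.1 [])
      (fun iw => iw.2.map (fun x => PySem.List.pyGetD x (k : Int) "")) _ [] []
  rw [hconc]
  -- the two filters coincide
  have hfil : (PySem.List.enumerate ys).filter (fun iw =>
        decide ((iw.2.map (fun x => PySem.List.pyGetD x (k : Int) "")).count "?" = 0))
      = (PySem.List.enumerate ys).filter (fun iw => !(pvBadSet iw.2).contains (k : Int)) :=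
    List.filter_congr (fun iw _ => pv_cond_eq iw.2 k)
  rw [hfil]
  set F := (PySem.List.enumerate ys).filter (fun iw => !(pvBadSet iw.2).contains (k : Int)) with hF
  have hmemF : ∀ iw ∈ F, iw ∈ PySem.List.enumerate ys := fun iw hiw => (List.mem_filter.mp hiw).1
  have htrue : (F.map (fun iw => iw.1)).flatMap (fun i => PySem.List.pyGetD gt i [])
      = F.flatMap (fun iw => PySem.List.pyGetD gt iw.1 []) := by
    rw [List.flatMap_map]
  have hpred : (F.map (fun iw => iw.1)).flatMap
        (fun i => (PySem.List.pyGetD ys i []).map (fun x => PySem.List.pyGetD x (k : Int) ""))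
      = F.flatMap (fun iw => iw.2.map (fun x => PySem.List.pyGetD x (k : Int) "")) := by
    rw [List.flatMap_map]
    simp only [List.flatMap_def]
    congr 1
    apply List.map_congr_left
    intro iw hiw
    rw [pv_getD_enum ys [] iw (hmemF iw hiw)]
  rw [htrue, hpred]

-- ===== VERDICT (by name: the statement is the Claim_ definition above) =====
theorem generate_answers_dict_spec : Claim_equal_generate_answers_dict := by
  intro ys gt _ _
  unfold Spec_generate_answers_dict
  exact pv_main ys gt
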